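-- pv_equiv track=rewrite | github.com/davebrent/dbp | scripts/rhythms.py | necklace
-- ===== SOURCE A (Python) =====
-- import collections
--
-- def necklace(rhythm1, rhythm2):
--     """Returns True if the two rhythms are part of the same necklace.
--
--     A rhythm is said to be part of the same necklace if the rhythm can be
--     rotated to be equal to the other.
--
--     (Godfried Toussaint, Geometry of musical rhythm. Page 74)
--
--     >>> necklace([1, 1, 1, 0, 0, 1, 1, 0, 0, 1, 0, 0], \
--                  [1, 0, 0, 1, 1, 1, 0, 0, 1, 1, 0, 0])
--     True
--     >>> necklace([1, 1, 1], [1, 0, 0, 1])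
--     False
--
--     """
--     if len(rhythm1) != len(rhythm2):
--         return False
--
--     if rhythm1 == rhythm2:
--         return True
--
--     rhythm = collections.deque(rhythm1)
--
--     for i in range(len(rhythm1)):
--         rhythm.rotate(-i)
--         if list(rhythm) == rhythm2:
--             return True
--
--     return False
-- ===== SOURCE B (Python) =====
-- def necklace(rhythm1, rhythm2):
--     if len(rhythm1) != len(rhythm2):
--         return False
--     if not rhythm1:
--         return True
--     n = len(rhythm1)
--     doubled = rhythm1 + rhythm1
--     return any(doubled[i:i + n] == rhythm2 for i in range(n))
-- ===== Notes on version B (the rewrite author's own statement) =====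
-- stated objective: alternative
-- what changed: B tests whether rhythm2 is a contiguous window of rhythm1+rhythm1 (the standard rotation test), instead of A's loop that rotates a deque cumulatively by -i each step and therefore only ever compares rotations at triangular-number offsets.
-- intended difference: On inputs where rhythm2 IS a rotation of rhythm1 but only by offsets k with k mod n not a triangular number i*(i+1)/2 mod n (e.g. ([0,0,1],[1,0,0])), A returns False and B returns True; B's value is intended since the function's documented purpose is to recognise ANY rotation, and A's cumulative deque.rotate(-i) is an evident bug that skips most offsets. — e.g. on necklace([0, 0, 1], [1, 0, 0]): A returns false, B returns true
import Mathlib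
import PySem

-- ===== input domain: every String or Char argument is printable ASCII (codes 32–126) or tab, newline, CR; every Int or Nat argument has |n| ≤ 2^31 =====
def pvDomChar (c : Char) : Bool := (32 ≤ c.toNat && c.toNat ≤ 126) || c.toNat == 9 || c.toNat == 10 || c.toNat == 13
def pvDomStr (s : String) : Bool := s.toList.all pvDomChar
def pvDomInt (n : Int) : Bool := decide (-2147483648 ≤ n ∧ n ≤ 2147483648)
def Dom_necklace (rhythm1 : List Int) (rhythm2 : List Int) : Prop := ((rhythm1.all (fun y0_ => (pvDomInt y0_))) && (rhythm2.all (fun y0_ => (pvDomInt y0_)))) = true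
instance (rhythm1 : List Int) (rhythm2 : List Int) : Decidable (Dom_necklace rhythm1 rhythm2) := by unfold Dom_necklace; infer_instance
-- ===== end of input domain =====

-- B replaces A's cumulative deque rotation (which only reaches triangular offsets — an evident
-- bug) by the standard "rhythm2 is a window of rhythm1 ++ rhythm1" rotation test; same O(n^2) cost.

-- ===== PORT A =====
-- the for-loop: state is the deque; each step does rhythm.rotate(-i) (= left-rotate by i,
-- List.rotate) on the CURRENT deque, then compares with rhythm2
def necklaceLoop (rhythm2 : List Int) : List Nat → List Int → Bool
  | [], _ => false
  | i :: is, d =>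
    let d' := d.rotate i
    if d' = rhythm2 then true else necklaceLoop rhythm2 is d'

def necklace (rhythm1 : List Int) (rhythm2 : List Int) : Bool :=
  if rhythm1.length ≠ rhythm2.length then false
  else if rhythm1 = rhythm2 then true
  else necklaceLoop rhythm2 (List.range rhythm1.length) rhythm1

-- ===== PORT B =====
def necklace_alt (rhythm1 : List Int) (rhythm2 : List Int) : Bool :=
  if rhythm1.length ≠ rhythm2.length then false
  else if rhythm1 = [] then true
  else
    let n := rhythm1.length
    let doubled := rhythm1 ++ rhythm1
    (List.range n).any (fun i =>
      PySem.List.slice doubled (some (i : Int)) (some ((i : Int) + (n : Int))) == rhythm2)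

-- ===== PRECONDITION & SPEC =====
-- On inputs where rhythm2 IS a rotation of rhythm1 but only by offsets whose residue mod n is not
-- a triangular number i*(i+1)/2 mod n, A returns False and B returns True; B's value is intended:
-- the function is documented to recognise ANY rotation, and A's cumulative deque.rotate(-i) only
-- ever compares the triangular-offset rotations.
def D_necklace (rhythm1 : List Int) (rhythm2 : List Int) : Prop :=
  rhythm1.length = rhythm2.length ∧ rhythm1 ≠ [] ∧
  (∃ k ∈ List.range rhythm1.length, rhythm1.rotate k = rhythm2) ∧
  (∀ i ∈ List.range rhythm1.length, rhythm1.rotate (i * (i + 1) / 2) ≠ rhythm2)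
instance (rhythm1 : List Int) (rhythm2 : List Int) : Decidable (D_necklace rhythm1 rhythm2) := by
  unfold D_necklace; infer_instance

def Spec_necklace (rhythm1 : List Int) (rhythm2 : List Int) (out : Bool) : Prop :=
  ¬ D_necklace rhythm1 rhythm2 → out = necklace_alt rhythm1 rhythm2
instance (rhythm1 : List Int) (rhythm2 : List Int) (out : Bool) : Decidable (Spec_necklace rhythm1 rhythm2 out) := by
  unfold Spec_necklace; infer_instance

def pvDiffWitness_necklace : List Int × List Int := ([0, 0, 1], [1, 0, 0])
def pvDiffWitnessOut_necklace : Bool × Bool := (false, true)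

-- ===== CLAIM (what is proved, stated in full; the proofs are below) =====
def Claim_unchanged_necklace : Prop := ∀ (rhythm1 : List Int) (rhythm2 : List Int), Dom_necklace rhythm1 rhythm2 → Spec_necklace rhythm1 rhythm2 (necklace rhythm1 rhythm2)
def Claim_changed_necklace : Prop := Dom_necklace (pvDiffWitness_necklace.1) (pvDiffWitness_necklace.2) ∧ D_necklace (pvDiffWitness_necklace.1) (pvDiffWitness_necklace.2) ∧ necklace (pvDiffWitness_necklace.1) (pvDiffWitness_necklace.2) = pvDiffWitnessOut_necklace.1 ∧ necklace_alt (pvDiffWitness_necklace.1) (pvDiffWitness_necklace.2) = pvDiffWitnessOut_necklace.2 ∧ pvDiffWitnessOut_necklace.1 ≠ pvDiffWitnessOut_necklace.2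
def Claim_exact_necklace : Prop := ∀ (rhythm1 : List Int) (rhythm2 : List Int), Dom_necklace rhythm1 rhythm2 → D_necklace rhythm1 rhythm2 → necklace rhythm1 rhythm2 ≠ necklace_alt rhythm1 rhythm2

-- ===== LEMMAS AND PROOFS =====

-- Gauss: sum of range is the triangular number
lemma two_mul_sum_range (m : Nat) : 2 * (List.range m).sum = m * (m - 1) := by
  induction m with
  | zero => simp
  | succ k ih =>
    rw [List.range_succ, List.sum_append]
    cases k with
    | zero => simp
    | succ j =>
      simp only [List.sum_cons, List.sum_nil] at *
      rw [Nat.mul_add, ih]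
      simp only [Nat.add_sub_cancel]
      ring

lemma sum_range_tri (m : Nat) : (List.range m).sum = m * (m - 1) / 2 := by
  have h := two_mul_sum_range m
  omega

-- the loop checks exactly the rotations by partial sums of the remaining index list
lemma necklaceLoop_iff (r2 : List Int) (is : List Nat) (d : List Int) :
    necklaceLoop r2 is d = true ↔ ∃ j < is.length, d.rotate ((is.take (j + 1)).sum) = r2 := by
  induction is generalizing d with
  | nil => simp [necklaceLoop]
  | cons i is ih =>
    simp only [necklaceLoop]
    split_ifs with h
    · simp only [true_iff]
      exact ⟨0, by simp, by simpa using h⟩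
    · rw [ih]
      constructor
      · rintro ⟨j, hj, hrot⟩
        refine ⟨j + 1, by simp only [List.length_cons]; omega, ?_⟩
        rw [List.take_succ_cons, List.sum_cons, ← List.rotate_rotate]
        exact hrot
      · rintro ⟨j, hj, hrot⟩
        cases j with
        | zero => exact absurd (by simpa using hrot) h
        | succ j' =>
          refine ⟨j', by simp only [List.length_cons] at hj; omega, ?_⟩
          rw [List.take_succ_cons, List.sum_cons] at hrot
          rw [List.rotate_rotate]
          exact hrot

-- characterization of A: (nonempty, equal lengths) A accepts iff some triangular-offset rotation matches
lemma necklace_char (r1 r2 : List Int) (hlen : r1.length = r2.length) (hne : r1 ≠ []) :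
    necklace r1 r2 = true ↔ ∃ j < r1.length, r1.rotate (j * (j + 1) / 2) = r2 := by
  have hn : 0 < r1.length := List.length_pos_iff.mpr hne
  unfold necklace
  rw [if_neg (by omega)]
  split_ifs with heq
  · simp only [true_iff]
    exact ⟨0, hn, by simpa using heq⟩
  · rw [necklaceLoop_iff]
    constructor
    · rintro ⟨j, hj, hrot⟩
      simp only [List.length_range] at hj
      refine ⟨j, hj, ?_⟩
      rwa [List.take_range, Nat.min_eq_left (by omega), sum_range_tri, Nat.add_sub_cancel,
        Nat.mul_comm] at hrot
    · rintro ⟨j, hj, hrot⟩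
      refine ⟨j, by simpa using hj, ?_⟩
      rwa [List.take_range, Nat.min_eq_left (by omega), sum_range_tri, Nat.add_sub_cancel,
        Nat.mul_comm]

-- a window of the doubled list is a rotation
lemma window_eq_rotate (r1 : List Int) (k : Nat) (hk : k ≤ r1.length) :
    ((r1 ++ r1).drop k).take r1.length = r1.rotate k := by
  rw [List.rotate_eq_drop_append_take hk]
  rw [List.drop_append_of_le_length hk]
  have hlen : (r1.drop k).length = r1.length - k := List.length_drop ..
  rw [List.take_append, hlen, List.take_of_length_le (by simp)]
  have h2 : r1.length - (r1.length - k) = k := by omega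
  rw [h2]

-- characterization of B: (nonempty, equal lengths) B accepts iff some rotation matches
lemma necklace_alt_char (r1 r2 : List Int) (hlen : r1.length = r2.length) (hne : r1 ≠ []) :
    necklace_alt r1 r2 = true ↔ ∃ k < r1.length, r1.rotate k = r2 := by
  unfold necklace_alt
  rw [if_neg (by omega), if_neg hne]
  simp only [List.any_eq_true, List.mem_range, beq_iff_eq]
  constructor
  · rintro ⟨i, hi, hslice⟩
    refine ⟨i, hi, ?_⟩
    rwa [PySem.List.slice_natCast_add, window_eq_rotate r1 i (by omega)] at hslice
  · rintro ⟨k, hk, hrot⟩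
    refine ⟨k, hk, ?_⟩
    rwa [PySem.List.slice_natCast_add, window_eq_rotate r1 k (by omega)]

lemma necklace_false_of_D (r1 r2 : List Int) (hD : D_necklace r1 r2) :
    necklace r1 r2 = false := by
  obtain ⟨hlen, hne, _, hfail⟩ := hD
  rw [← Bool.not_eq_true, necklace_char r1 r2 hlen hne]
  rintro ⟨j, hj, hrot⟩
  exact hfail j (List.mem_range.mpr hj) hrot

lemma necklace_alt_true_of_D (r1 r2 : List Int) (hD : D_necklace r1 r2) :
    necklace_alt r1 r2 = true := by
  obtain ⟨hlen, hne, ⟨k, hk, hrot⟩, _⟩ := hD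
  exact (necklace_alt_char r1 r2 hlen hne).mpr ⟨k, List.mem_range.mp hk, hrot⟩

-- ===== VERDICT (by name: the statement is the Claim_ definition above) =====
theorem necklace_spec : Claim_unchanged_necklace := by
  intro r1 r2 _hdom
  unfold Spec_necklace
  intro hnD
  by_cases hlen : r1.length = r2.length
  · by_cases hne : r1 = []
    · have hr2 : r2 = [] := by
        subst hne; exact List.eq_nil_of_length_eq_zero (by simpa using hlen.symm)
      subst hne; subst hr2
      simp [necklace, necklace_alt]
    · -- nonempty, equal lengths; ¬D means: no rotation matches, or some triangular one does
      have hA := necklace_char r1 r2 hlen hne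
      have hB := necklace_alt_char r1 r2 hlen hne
      by_cases hex : ∃ k < r1.length, r1.rotate k = r2
      · -- some rotation matches; since ¬D, some triangular rotation matches too
        by_cases htri : ∃ j < r1.length, r1.rotate (j * (j + 1) / 2) = r2
        · rw [hA.mpr htri, hB.mpr hex]
        · exfalso
          apply hnD
          refine ⟨hlen, hne, ?_, ?_⟩
          · obtain ⟨k, hk, h⟩ := hex
            exact ⟨k, List.mem_range.mpr hk, h⟩
          · intro i hi h
            exact htri ⟨i, List.mem_range.mp hi, h⟩
      · -- no rotation matches: both reject (triangular rotations are rotations)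
        have hAfalse : necklace r1 r2 = false := by
          rw [← Bool.not_eq_true, hA]
          rintro ⟨j, hj, hrot⟩
          have hn : 0 < r1.length := List.length_pos_iff.mpr hne
          refine hex ⟨j * (j + 1) / 2 % r1.length, Nat.mod_lt _ hn, ?_⟩
          rwa [← List.rotate_mod] at hrot
        have hBfalse : necklace_alt r1 r2 = false := by
          rw [← Bool.not_eq_true, hB]; exact hex
        rw [hAfalse, hBfalse]
  · unfold necklace necklace_alt
    rw [if_pos hlen, if_pos hlen]

theorem necklace_changed : Claim_changed_necklace := by
  unfold Claim_changed_necklace; decide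

theorem necklace_tight : Claim_exact_necklace := by
  intro r1 r2 _hdom hD
  rw [necklace_false_of_D r1 r2 hD, necklace_alt_true_of_D r1 r2 hD]
  simp
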